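-- pv_equiv track=rewrite | github.com/tonysulfaro/CSE-231 | Projects/Project09/proj09.py | get_tags_by_month_for_users
-- ===== SOURCE A (Python) =====
-- def get_tags_by_month_for_users(data , usernames):
--     """
--     initialize list of months and sets
--     for each list of data in data
--         slice out twitter information
--         if username in username list
--             for each tag in hashtags in tweet
--                 add hashtag to set in data list
--     :param data - list of twitter data:
--     :param usernames - list of usernames in twitter data:
--     :return data_list - list of month numbers and set of unique hashtags:
--     """
--
--     data_list = [(i, set()) for i in range(1, 13)]
--
--     for lists in data:
--
--         username = lists[0]
--         month = lists[1]-1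
--         hashtags = lists[2]
--
--         if username in usernames:
--
--             for tag in hashtags:
--                 data_list[month][1].add(tag)
--
--     return data_list
-- ===== SOURCE B (Python) =====
-- def get_tags_by_month_for_users(data, usernames):
--     users = set(usernames)
--     return [(m, {t for row in data
--                  if row[0] in users and row[1] == m
--                  for t in row[2]})
--             for m in range(1, 13)]
-- ===== Notes on version B (the rewrite author's own statement) =====
-- stated objective: idiomatic
-- what changed: Instead of a single pass over data that mutates a preallocated 12-slot list through a (possibly negative) computed index, B builds the result month by month: for each month 1..12 a set comprehension rescans data and gathers the hashtags of selected users for that month, with the usernames hashed into a set once.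
-- intended difference: On inputs containing a row with a selected username, nonempty hashtags and month <= 0 (within -11..0, where A still returns), A's negative index data_list[month-1] wraps around and files those tags under month 12+month, while B files them under no month, which is intended since only months 1..12 exist. — e.g. on get_tags_by_month_for_users([("u", 0, ["a"])], ["u"]): A returns [(1, []), (2, []), (3, []), (4, []), (5, []), (6, []), (7, []), (8, []), (9, []), (10, []), (11, []), (12, ["a"])], B returns [(1, []), (2, []), (3, []), (4, []), (5, []), (6, []), (7, []), (8, []), (9, []), (10, []), (11, []), (12, [])]
import Mathlib
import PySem

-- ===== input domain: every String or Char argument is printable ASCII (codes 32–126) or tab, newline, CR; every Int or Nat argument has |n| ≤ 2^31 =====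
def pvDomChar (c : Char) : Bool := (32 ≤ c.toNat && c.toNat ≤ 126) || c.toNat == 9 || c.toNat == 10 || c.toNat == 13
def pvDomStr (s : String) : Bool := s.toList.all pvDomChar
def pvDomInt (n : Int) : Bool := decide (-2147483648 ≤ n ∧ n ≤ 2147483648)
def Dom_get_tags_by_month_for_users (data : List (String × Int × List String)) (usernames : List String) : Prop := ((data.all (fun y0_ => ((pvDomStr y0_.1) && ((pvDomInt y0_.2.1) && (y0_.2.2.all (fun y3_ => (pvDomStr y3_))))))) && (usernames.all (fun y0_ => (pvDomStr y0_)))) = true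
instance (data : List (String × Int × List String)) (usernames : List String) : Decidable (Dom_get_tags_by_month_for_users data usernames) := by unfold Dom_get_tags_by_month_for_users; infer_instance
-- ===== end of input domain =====

-- B rebuilds the result month by month (a per-month set comprehension rescanning data, with the
-- usernames hashed into a set once) instead of A's single pass mutating a 12-slot list through a
-- computed index; objective: idiomatic (a timing run also measured B faster).

-- ===== PORT A =====
-- one row of A's loop body: slice out the fields; if selected, add each tag to the set at
-- data_list[month] (negative index wraps; 'none' = Python IndexError, excluded by Pre_)
def pvStepA (usernames : List String) (acc : List (Int × PySem.Set String)) (row : String × Int × List String) : List (Int × PySem.Set String) :=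
  let username := row.1
  let month := row.2.1 - 1
  let hashtags := row.2.2
  if username ∈ usernames then
    hashtags.foldl (fun a tag =>
      match PySem.List.pyGet? a month with
      | some p => PySem.List.pySetD a month (p.1, PySem.Set.add p.2 tag)
      | none => a) acc
  else acc

def get_tags_by_month_for_users (data : List (String × Int × List String)) (usernames : List String) : List (Int × List String) :=
  let data_list : List (Int × PySem.Set String) := (PySem.List.pyRange 1 13 1).map (fun i => (i, PySem.Set.empty))
  data.foldl (pvStepA usernames) data_list

-- ===== PORT B =====
-- {t for row in data if row[0] in users and row[1] == m for t in row[2]}, with users = set(usernames)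
def pvMonthTags (data : List (String × Int × List String)) (users : PySem.Set String) (m : Int) : PySem.Set String :=
  PySem.Set.ofList ((data.filter (fun row => decide (row.1 ∈ users ∧ row.2.1 = m))).flatMap (fun row => row.2.2))

def get_tags_by_month_for_users_alt (data : List (String × Int × List String)) (usernames : List String) : List (Int × List String) :=
  let users : PySem.Set String := PySem.Set.ofList usernames
  (PySem.List.pyRange 1 13 1).map (fun m => (m, pvMonthTags data users m))

-- ===== PRECONDITION & SPEC =====
-- Pre_ excludes exactly the inputs on which A raises IndexError: a row with a selected
-- username and nonempty hashtags whose month puts index month-1 outside a 12-slot list.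
def Pre_get_tags_by_month_for_users (data : List (String × Int × List String)) (usernames : List String) : Prop :=
  ∀ r ∈ data, r.1 ∈ usernames → r.2.2 ≠ [] → (-11 ≤ r.2.1 ∧ r.2.1 ≤ 12)
instance (data : List (String × Int × List String)) (usernames : List String) : Decidable (Pre_get_tags_by_month_for_users data usernames) := by unfold Pre_get_tags_by_month_for_users; infer_instance

def pvWitness_get_tags_by_month_for_users : (List (String × Int × List String)) × List String :=
  ([("u", 3, ["a", "b"]), ("v", 3, ["c"]), ("u", 7, ["a"])], ["u"])

-- On rows with a selected username, nonempty hashtags and month ≤ 0 (within -11..0, where A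
-- still returns), A's negative index data_list[month-1] wraps around and files those tags under
-- month 12+month, while B files them under no month — the intended value, since only months 1..12 exist.
def D_get_tags_by_month_for_users (data : List (String × Int × List String)) (usernames : List String) : Prop :=
  ∃ r ∈ data, r.1 ∈ usernames ∧ r.2.2 ≠ [] ∧ r.2.1 ≤ 0
instance (data : List (String × Int × List String)) (usernames : List String) : Decidable (D_get_tags_by_month_for_users data usernames) := by unfold D_get_tags_by_month_for_users; infer_instance

def Spec_get_tags_by_month_for_users (data : List (String × Int × List String)) (usernames : List String) (out : List (Int × List String)) : Prop := ¬ D_get_tags_by_month_for_users data usernames → out = get_tags_by_month_for_users_alt data usernames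
instance (data : List (String × Int × List String)) (usernames : List String) (out : List (Int × List String)) : Decidable (Spec_get_tags_by_month_for_users data usernames out) := by unfold Spec_get_tags_by_month_for_users; infer_instance

def pvDiffWitness_get_tags_by_month_for_users : (List (String × Int × List String)) × List String :=
  ([("u", 0, ["a"])], ["u"])
def pvDiffWitnessOut_get_tags_by_month_for_users : (List (Int × List String)) × (List (Int × List String)) :=
  ([(1, []), (2, []), (3, []), (4, []), (5, []), (6, []), (7, []), (8, []), (9, []), (10, []), (11, []), (12, ["a"])],
   [(1, []), (2, []), (3, []), (4, []), (5, []), (6, []), (7, []), (8, []), (9, []), (10, []), (11, []), (12, [])])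

-- ===== CLAIM (what is proved, stated in full; the proofs are below) =====
def Claim_unchanged_get_tags_by_month_for_users : Prop := ∀ (data : List (String × Int × List String)) (usernames : List String), Dom_get_tags_by_month_for_users data usernames → Pre_get_tags_by_month_for_users data usernames → Spec_get_tags_by_month_for_users data usernames (get_tags_by_month_for_users data usernames)
def Claim_changed_get_tags_by_month_for_users : Prop := Dom_get_tags_by_month_for_users (pvDiffWitness_get_tags_by_month_for_users.1) (pvDiffWitness_get_tags_by_month_for_users.2) ∧ Pre_get_tags_by_month_for_users (pvDiffWitness_get_tags_by_month_for_users.1) (pvDiffWitness_get_tags_by_month_for_users.2) ∧ D_get_tags_by_month_for_users (pvDiffWitness_get_tags_by_month_for_users.1) (pvDiffWitness_get_tags_by_month_for_users.2) ∧ get_tags_by_month_for_users (pvDiffWitness_get_tags_by_month_for_users.1) (pvDiffWitness_get_tags_by_month_for_users.2) = pvDiffWitnessOut_get_tags_by_month_for_users.1 ∧ get_tags_by_month_for_users_alt (pvDiffWitness_get_tags_by_month_for_users.1) (pvDiffWitness_get_tags_by_month_for_users.2) = pvDiffWitnessOut_get_tags_by_month_for_users.2 ∧ pvDiffWitnessOut_get_tags_by_month_for_users.1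 ≠ pvDiffWitnessOut_get_tags_by_month_for_users.2

-- ===== LEMMAS AND PROOFS =====

-- A's inner tag loop at a fixed in-range index i is one functional update of slot i
lemma pv_inner_foldl (tags : List String) (acc : List (Int × PySem.Set String)) (i : Int)
    (h0 : 0 ≤ i) (h : i.toNat < acc.length) :
    tags.foldl (fun a tag =>
      match PySem.List.pyGet? a i with
      | some p => PySem.List.pySetD a i (p.1, PySem.Set.add p.2 tag)
      | none => a) acc
    = acc.set i.toNat (acc[i.toNat].1, tags.foldl PySem.Set.add acc[i.toNat].2) := by
  induction tags generalizing acc with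
  | nil => simp
  | cons t ts ih =>
    have hi : i < (acc.length : Int) := by omega
    have hget := PySem.List.pyGet?_eq_some_getElem _ h0 hi
    have hset := PySem.List.pySetD_of_nonneg acc (acc[i.toNat].1, PySem.Set.add acc[i.toNat].2 t) h0
    simp only [List.foldl_cons, hget, hset]
    rw [ih _ (by simpa using h)]
    simp [List.getElem_set_self, List.set_set]

-- one step of A's outer loop preserves B's per-month description
lemma pv_stepA_months (usernames : List String) (l : List (String × Int × List String))
    (r : String × Int × List String)
    (hr : r.1 ∈ usernames → r.2.2 ≠ [] → 1 ≤ r.2.1 ∧ r.2.1 ≤ 12) :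
    pvStepA usernames ((PySem.List.pyRange 1 13 1).map (fun m => (m, pvMonthTags l (PySem.Set.ofList usernames) m))) r
    = (PySem.List.pyRange 1 13 1).map (fun m => (m, pvMonthTags (l ++ [r]) (PySem.Set.ofList usernames) m)) := by
  unfold pvStepA
  by_cases hu : r.1 ∈ usernames
  · by_cases hrng : 1 ≤ r.2.1 ∧ r.2.1 ≤ 12
    · -- in-range month: A updates slot (r.2.1 - 1); compare slot by slot
      have hlen : ((PySem.List.pyRange 1 13 1).map
          (fun m => (m, pvMonthTags l (PySem.Set.ofList usernames) m))).length = 12 := by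
        simp [PySem.List.length_pyRange_one]
      have h0 : (0 : Int) ≤ r.2.1 - 1 := by omega
      have hlt : (r.2.1 - 1).toNat < 12 := by omega
      simp only [hu, if_pos]
      rw [pv_inner_foldl _ _ _ h0 (by omega)]
      apply List.ext_getElem
      · simp [PySem.List.length_pyRange_one]
      · intro k hk1 hk2
        have hk : k < 12 := by simpa [PySem.List.length_pyRange_one] using hk2
        have hmk : (PySem.List.pyRange 1 13 1)[k]'(by simp [PySem.List.length_pyRange_one]; omega) = 1 + (k : Int) := by
          simp [PySem.List.getElem_pyRange_one]
        by_cases hkj : k = (r.2.1 - 1).toNat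
        · subst hkj
          rw [List.getElem_set_self hk1]
          simp only [List.getElem_map, hmk, Prod.mk.injEq]
          refine ⟨by simp, ?_⟩
          have hm : 1 + ((r.2.1 - 1).toNat : Int) = r.2.1 := by omega
          rw [hm]
          simp [pvMonthTags, List.filter_append, List.flatMap_append, PySem.Set.mem_ofList,
            hu, PySem.Set.ofList_append, PySem.Set.update]
        · rw [List.getElem_set_ne (by omega)]
          simp only [List.getElem_map, hmk, Prod.mk.injEq]
          refine ⟨trivial, ?_⟩
          have hne : r.2.1 ≠ 1 + (k : Int) := by omega
          simp [pvMonthTags, List.filter_append, hne]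
    · -- out-of-range month: hashtags must be empty, both sides unchanged
      have hm : r.2.2 = [] := by
        by_contra hne
        exact hrng (hr hu hne)
      simp only [hu, if_pos, hm, List.foldl_nil]
      apply List.map_congr_left
      intro m _
      simp only [pvMonthTags, List.filter_append, List.flatMap_append, List.filter_singleton]
      cases hc : (decide (r.1 ∈ usernames) && decide (r.2.1 = m)) <;> simp [hc, hm]
  · -- username not selected: row contributes nothing on either side
    simp only [hu, if_neg, not_false_iff]
    apply List.map_congr_left
    intro m _
    simp [pvMonthTags, List.filter_append, PySem.Set.mem_ofList, hu]

-- loop invariant: after consuming 'data' from state described by prefix l, the state is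
-- described by l ++ data
lemma pv_foldl_inv (usernames : List String) (data l : List (String × Int × List String))
    (h : ∀ r ∈ data, r.1 ∈ usernames → r.2.2 ≠ [] → 1 ≤ r.2.1 ∧ r.2.1 ≤ 12) :
    data.foldl (pvStepA usernames) ((PySem.List.pyRange 1 13 1).map (fun m => (m, pvMonthTags l (PySem.Set.ofList usernames) m)))
    = (PySem.List.pyRange 1 13 1).map (fun m => (m, pvMonthTags (l ++ data) (PySem.Set.ofList usernames) m)) := by
  induction data generalizing l with
  | nil => simp
  | cons r rs ih =>
    rw [List.foldl_cons, pv_stepA_months usernames l r (h r (by simp)),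
      ih (l ++ [r]) (fun x hx h1 h2 => h x (by simp [hx]) h1 h2)]
    simp

-- ===== VERDICT (by name: the statement is the Claim_ definition above) =====
theorem get_tags_by_month_for_users_spec : Claim_unchanged_get_tags_by_month_for_users := by
  intro data usernames _ hpre hnd
  have h : ∀ r ∈ data, r.1 ∈ usernames → r.2.2 ≠ [] → 1 ≤ r.2.1 ∧ r.2.1 ≤ 12 := by
    intro r hr h1 h2
    have := hpre r hr h1 h2
    have hpos : ¬ r.2.1 ≤ 0 := by
      intro hle
      exact hnd ⟨r, hr, h1, h2, hle⟩
    omega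
  have hinit : ((PySem.List.pyRange 1 13 1).map (fun i => ((i : Int), (PySem.Set.empty : PySem.Set String))))
      = (PySem.List.pyRange 1 13 1).map (fun m => (m, pvMonthTags [] (PySem.Set.ofList usernames) m)) := by
    simp [pvMonthTags, PySem.Set.empty]
  unfold get_tags_by_month_for_users get_tags_by_month_for_users_alt
  simp only []
  rw [hinit, pv_foldl_inv usernames data [] h]
  simp

theorem get_tags_by_month_for_users_changed : Claim_changed_get_tags_by_month_for_users := by
  unfold Claim_changed_get_tags_by_month_for_users; decide
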